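-- pv_equiv track=rewrite | github.com/stephanGarland/bitmap-rle-compressor | bmp_rle.py | make_bmp
-- ===== SOURCE A (Python) =====
-- def make_bmp(column):
--     column_bmp = []
--     column_str = ""
--     for i in range(len(column)):
--         for j in range(len(column)):
--             if column[j] == column[i]:
--                 column_str = column_str + "1"
--             else:
--                 column_str = column_str + "0"
--         column_bmp.append(column_str)
--         column_str = ""
--     return column_bmp
-- ===== SOURCE B (Python) =====
-- def make_bmp(column):
--     cache = {}
--     for v in column:
--         if v not in cache:
--             cache[v] = "".join("1" if x == v else "0" for x in column)
--     return [cache[v] for v in column]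
-- ===== Notes on version B (the rewrite author's own statement) =====
-- stated objective: faster
-- what changed: Instead of rebuilding each row's bitmap string character by character in an O(n^2) double loop, B caches the bitmap string for each distinct value in a dict (built once per distinct value with a join) and reuses the shared string for repeated values.
import Mathlib
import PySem

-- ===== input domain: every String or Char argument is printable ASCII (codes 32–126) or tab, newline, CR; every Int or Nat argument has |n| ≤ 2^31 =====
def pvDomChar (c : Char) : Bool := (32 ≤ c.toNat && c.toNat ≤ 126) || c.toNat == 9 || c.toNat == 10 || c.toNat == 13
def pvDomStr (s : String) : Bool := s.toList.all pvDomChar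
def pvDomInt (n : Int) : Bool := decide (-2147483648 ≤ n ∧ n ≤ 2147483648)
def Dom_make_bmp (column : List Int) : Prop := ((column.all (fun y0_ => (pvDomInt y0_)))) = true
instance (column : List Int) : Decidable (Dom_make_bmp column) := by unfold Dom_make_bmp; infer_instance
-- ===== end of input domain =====

-- B replaces A's quadratic per-row rebuilding by a dict cache that builds each distinct value's bitmap string once and reuses it (faster).


-- ===== PORT A =====
-- column[j] / column[i] with i, j in range(len(column)) never raise; pyGetD is exact there.
def make_bmp (column : List Int) : List String :=
  (PySem.List.pyRange 0 (PySem.List.len column) 1).foldl (fun column_bmp i =>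
    column_bmp ++
      [((PySem.List.pyRange 0 (PySem.List.len column) 1).foldl (fun column_str j =>
          if PySem.List.pyGetD column j 0 == PySem.List.pyGetD column i 0
          then column_str ++ "1" else column_str ++ "0") "")]) []

-- ===== PORT B =====
-- '"".join("1" if x == v else "0" for x in column)'
def pvBitmap (column : List Int) (v : Int) : String :=
  PySem.Str.join "" (column.map (fun x => if x == v then "1" else "0"))

-- cache[v] exists for every v in column, so Python's cache[v] never raises; getD "" is exact there.
def make_bmp_alt (column : List Int) : List String :=
  let cache : PySem.Dict Int String :=
    column.foldl (fun d v => if d.contains v then d else d.insert v (pvBitmap column v))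
      PySem.Dict.empty
  column.map (fun v => cache.getD v "")

-- ===== PRECONDITION & SPEC =====
def Spec_make_bmp (column : List Int) (out : List String) : Prop := out = make_bmp_alt column
instance (column : List Int) (out : List String) : Decidable (Spec_make_bmp column out) := by unfold Spec_make_bmp; infer_instance

-- ===== CLAIM (what is proved, stated in full; the proofs are below) =====
def Claim_equal_make_bmp : Prop := ∀ (column : List Int), Dom_make_bmp column → Spec_make_bmp column (make_bmp column)

-- ===== LEMMAS AND PROOFS =====

theorem flatten_intersperse_nil {α : Type} (l : List (List α)) :
    (List.intersperse ([] : List α) l).flatten = l.flatten := by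
  induction l with
  | nil => simp
  | cons a l ih => cases l <;> simp_all [List.intersperse]

theorem pvBitmap_cons (x : Int) (t : List Int) (v : Int) :
    pvBitmap (x :: t) v = (if x == v then "1" else "0") ++ pvBitmap t v := by
  apply String.toList_injective
  simp [pvBitmap, PySem.Str.join, PySem.Chars.join, List.intercalate, flatten_intersperse_nil]

theorem pvBitmap_nil (v : Int) : pvBitmap [] v = "" := rfl

theorem inner_foldl_eq (column : List Int) (v : Int) :
    ∀ (acc : String),
      column.foldl (fun s x => if x == v then s ++ "1" else s ++ "0") acc
        = acc ++ pvBitmap column v := by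
  induction column with
  | nil => intro acc; simp [pvBitmap_nil]
  | cons x t ih =>
    intro acc
    simp only [List.foldl_cons, pvBitmap_cons]
    by_cases h : (x == v) = true
    · rw [if_pos h, if_pos h, ih, String.append_assoc]
    · rw [if_neg h, if_neg h, ih, String.append_assoc]

theorem make_bmp_eq_map (column : List Int) :
    make_bmp column = column.map (pvBitmap column) := by
  unfold make_bmp
  rw [PySem.List.foldl_append_singleton_eq_map, List.nil_append]
  have h1 : (fun i => (PySem.List.pyRange 0 (PySem.List.len column) 1).foldl
        (fun column_str j =>
          if PySem.List.pyGetD column j 0 == PySem.List.pyGetD column i 0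
          then column_str ++ "1" else column_str ++ "0") "")
      = fun i => pvBitmap column (PySem.List.pyGetD column i 0) := by
    funext i
    rw [PySem.List.foldl_pyRange_zero_pyGetD column 0
        (fun s x => if x == PySem.List.pyGetD column i 0 then s ++ "1" else s ++ "0") ""]
    simpa using inner_foldl_eq column (PySem.List.pyGetD column i 0) ""
  rw [h1]
  rw [show (fun i => pvBitmap column (PySem.List.pyGetD column i 0))
        = (pvBitmap column) ∘ (fun i => PySem.List.pyGetD column i 0) from rfl]
  rw [← List.map_map, PySem.List.map_pyGetD_pyRange_zero]

theorem cache_spec (column : List Int) :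
    ∀ (l : List Int) (d : PySem.Dict Int String)
      (_ : ∀ k, d.contains k = true → d.getD k "" = pvBitmap column k)
      (v : Int), (v ∈ l ∨ d.contains v = true) →
      (l.foldl (fun d v => if d.contains v then d else d.insert v (pvBitmap column v)) d).getD v ""
        = pvBitmap column v := by
  intro l
  induction l with
  | nil =>
    intro d hd v hv
    simp only [List.foldl_nil]
    exact hd v (hv.resolve_left (by simp))
  | cons a t ih =>
    intro d hd v hv
    simp only [List.foldl_cons]
    by_cases hc : d.contains a = true
    · simp only [hc, if_pos]
      apply ih d hd
      rcases hv with hm | hdv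
      · rcases List.mem_cons.mp hm with rfl | ht
        · exact Or.inr hc
        · exact Or.inl ht
      · exact Or.inr hdv
    · simp only [hc, if_neg, Bool.false_eq_true, not_false_iff]
      apply ih
      · intro k hk
        rw [PySem.Dict.getD_insert]
        by_cases hka : k = a
        · simp [hka]
        · rw [if_neg hka]
          apply hd
          rw [PySem.Dict.contains_insert] at hk
          simpa [hka] using hk
      · rcases hv with hm | hdv
        · rcases List.mem_cons.mp hm with rfl | ht
          · exact Or.inr (PySem.Dict.contains_insert_self _ _ _)
          · exact Or.inl ht
        · exact Or.inr (by rw [PySem.Dict.contains_insert]; simp [hdv])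

theorem make_bmp_alt_eq_map (column : List Int) :
    make_bmp_alt column = column.map (pvBitmap column) := by
  unfold make_bmp_alt
  apply List.map_congr_left
  intro v hv
  exact cache_spec column column PySem.Dict.empty
    (by intro k hk; simp [PySem.Dict.contains_empty] at hk) v (Or.inl hv)

-- ===== VERDICT (by name: the statement is the Claim_ definition above) =====
theorem make_bmp_spec : Claim_equal_make_bmp := by
  intro column _
  unfold Spec_make_bmp
  rw [make_bmp_eq_map, make_bmp_alt_eq_map]
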